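-- pv_equiv track=rewrite | github.com/Sabarivasan-Velayutham/Competitive_Programming_Practice | Strings/freq_string_based.py | can_open_file
-- ===== SOURCE A (Python) =====
-- def can_open_file(password):
--     freq = {}
--     for char in password:
--         if char in freq:
--             freq[char] += 1
--         else:
--             freq[char] = 1
--
--     total_freq = sum(freq.values())
--     for char in freq:
--         if freq[char] == total_freq - freq[char]:
--             return "YES"
--
--     return "NO"
-- ===== SOURCE B (Python) =====
-- def can_open_file(password):
--     s = sorted(password)
--     n = len(s)
--     i = 0
--     while i < n:
--         j = i + 1
--         while j < n and s[j] == s[i]: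
--             j += 1
--         if 2 * (j - i) == n:
--             return "YES"
--         i = j
--     return "NO"
-- ===== Notes on version B (the rewrite author's own statement) =====
-- stated objective: alternative
-- what changed: Replaces the frequency dictionary plus a second pass over its keys by sorting the characters and scanning the sorted list once, checking each run of equal characters for length exactly n/2.
import Mathlib
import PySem

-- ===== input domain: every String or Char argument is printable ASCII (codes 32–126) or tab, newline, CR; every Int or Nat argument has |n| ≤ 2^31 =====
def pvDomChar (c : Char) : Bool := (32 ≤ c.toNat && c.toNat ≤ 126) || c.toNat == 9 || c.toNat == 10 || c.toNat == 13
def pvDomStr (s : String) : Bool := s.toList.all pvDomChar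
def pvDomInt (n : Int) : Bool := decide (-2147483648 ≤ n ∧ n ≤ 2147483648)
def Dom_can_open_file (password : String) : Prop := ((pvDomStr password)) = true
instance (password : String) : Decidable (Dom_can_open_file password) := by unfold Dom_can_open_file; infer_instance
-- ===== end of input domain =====

-- B answers "does some character occupy exactly half the string" by sorting and scanning runs instead of A's frequency dictionary; same result, different algorithm.


-- ===== PORT A =====
-- freq built char by char (branching on membership as A does), then the sum of its values, then a scan of the keys with early return ("YES" on the first hit).
def can_open_file (password : String) : String :=
  let freq : PySem.Dict Char Int :=
    password.toList.foldl
      (fun d c => if d.contains c then d.insert c (d.getD c 0 + 1) else d.insert c 1)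
      PySem.Dict.empty
  let total : Int := freq.values.sum
  if freq.keys.any (fun c => freq.getD c 0 == total - freq.getD c 0) then "YES" else "NO"

-- ===== PORT B =====
-- Source B's outer while-loop: each step consumes one maximal run of equal characters (inner while j) from the sorted list.
def runScan (n : Nat) : List Char → String
  | [] => "NO"
  | c :: rest =>
    if 2 * ((rest.takeWhile (fun x => x == c)).length + 1) = n then "YES"
    else runScan n (rest.dropWhile (fun x => x == c))
termination_by l => l.length
decreasing_by simpa using Nat.lt_succ_of_le (List.length_dropWhile_le _ _)

def can_open_file_alt (password : String) : String :=
  runScan password.toList.length (PySem.List.sorted password.toList (fun c => c) false)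

-- ===== PRECONDITION & SPEC =====
def Spec_can_open_file (password : String) (out : String) : Prop := out = can_open_file_alt password
instance (password : String) (out : String) : Decidable (Spec_can_open_file password out) := by unfold Spec_can_open_file; infer_instance

-- ===== CLAIM (what is proved, stated in full; the proofs are below) =====
def Claim_equal_can_open_file : Prop := ∀ (password : String), Dom_can_open_file password → Spec_can_open_file password (can_open_file password)

-- ===== LEMMAS AND PROOFS =====

-- A's branching fold step is extensionally the branchless counting insert.
lemma step_eq :
    (fun (d : PySem.Dict Char Int) c => if d.contains c then d.insert c (d.getD c 0 + 1) else d.insert c 1)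
      = (fun (d : PySem.Dict Char Int) c => d.insert c (d.getD c 0 + 1)) := by
  funext d c
  by_cases h : d.contains c = true
  · simp [h]
  · rw [if_neg (by simpa using h), PySem.Dict.getD_of_not_contains d (0:Int) (by simpa using h)]; norm_num

-- summing each distinct character's count gives the length
lemma ofList_count_sum (xs : List Char) :
    ((PySem.Set.ofList xs).map (fun k => xs.count k)).sum = xs.length := by
  have hperm : (PySem.Set.ofList xs).Perm xs.dedup :=
    (List.perm_ext_iff_of_nodup (PySem.Set.nodup_ofList xs) xs.nodup_dedup).mpr
      (fun a => by simp [PySem.Set.mem_ofList])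
  calc ((PySem.Set.ofList xs).map (fun k => xs.count k)).sum
      = ((xs.dedup).map (fun k => xs.count k)).sum := (hperm.map _).sum_eq
    _ = xs.length := List.sum_map_count_dedup_eq_length xs

-- A's total (sum of the counter's values) is the length of the string
lemma values_counter_sum (xs : List Char) :
    (PySem.Dict.counter xs : PySem.Dict Char Int).values.sum = (xs.length : Int) := by
  have : (PySem.Dict.counter xs : PySem.Dict Char Int).values
      = (PySem.Set.ofList xs).map (fun k => (xs.count k : Int)) := by
    simp only [PySem.Dict.values, PySem.Dict.items_counter, List.map_map]; rfl
  rw [this, ← ofList_count_sum xs]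
  push_cast
  rw [List.map_map]
  rfl

-- A returns "YES" exactly when some character's count is half the length
lemma A_eq (p : String) :
    can_open_file p =
      if ∃ c ∈ p.toList, 2 * p.toList.count c = p.toList.length then "YES" else "NO" := by
  unfold can_open_file
  simp only [step_eq, PySem.Dict.foldl_insert_getD_add_one_eq_counter, values_counter_sum,
    PySem.Dict.keys_counter, PySem.Dict.getD_counter]
  by_cases hex : ∃ c ∈ p.toList, 2 * p.toList.count c = p.toList.length
  · rw [if_pos ?_, if_pos hex]
    obtain ⟨c, hc, h2⟩ := hex
    refine List.any_eq_true.mpr ⟨c, (PySem.Set.mem_ofList _ _).mpr hc, ?_⟩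
    rw [beq_iff_eq]; omega
  · rw [if_neg ?_, if_neg hex]
    intro hany
    obtain ⟨c, hc, hb⟩ := List.any_eq_true.mp hany
    rw [beq_iff_eq] at hb
    exact hex ⟨c, (PySem.Set.mem_ofList _ _).mp hc, by omega⟩

-- B's run scan over a sorted list answers the same question: each recursive step removes
-- one maximal run, which on a sorted list is exactly all occurrences of its first character.
lemma runScan_eq (fuel : Nat) (n : Nat) (l : List Char) (hf : l.length ≤ fuel)
    (h : l.Pairwise (· ≤ ·)) :
    runScan n l = if ∃ x ∈ l, 2 * l.count x = n then "YES" else "NO" := by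
  induction fuel generalizing l with
  | zero =>
    rw [List.eq_nil_of_length_eq_zero (Nat.le_zero.mp hf)]
    simp [runScan]
  | succ f ih =>
    match l with
    | [] => simp [runScan]
    | c :: rest =>
      have hcle : ∀ x ∈ rest, c ≤ x := (List.pairwise_cons.mp h).1
      have hrp : rest.Pairwise (· ≤ ·) := (List.pairwise_cons.mp h).2
      set t := rest.takeWhile (fun x => x == c) with ht
      set d := rest.dropWhile (fun x => x == c) with hd
      have hsplit : t ++ d = rest := List.takeWhile_append_dropWhile
      have htc : ∀ x ∈ t, x = c := fun x hx => by
        have := List.mem_takeWhile_imp hx; simpa using this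
      have hdp : d.Pairwise (· ≤ ·) := hrp.sublist (List.dropWhile_sublist _)
      -- c does not occur in the dropped-to suffix d
      have hcd : c ∉ d := by
        intro hmem
        match hdhead : d with
        | [] => simp at hmem
        | h0 :: d' =>
          have hh0 : (fun x => x == c) h0 = false := by
            have := List.head?_dropWhile_not (fun x => x == c) rest
            rw [← hd] at this
            simpa using this
          have hh0ne : h0 ≠ c := by simpa using hh0
          have hh0mem : h0 ∈ rest := hsplit ▸ (List.mem_append_right t (by simp))
          have hch0 : c < h0 := lt_of_le_of_ne (hcle h0 hh0mem) (Ne.symm hh0ne)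
          rcases List.mem_cons.mp hmem with rfl | hmem'
          · exact absurd rfl hh0ne
          · have := (List.pairwise_cons.mp hdp).1 c hmem'
            exact absurd this (not_le.mpr hch0)
      have hcountc : (c :: rest).count c = t.length + 1 := by
        have h1 : t.count c = t.length := List.count_eq_length.mpr (fun b hb => (htc b hb).symm)
        have h2 : d.count c = 0 := List.count_eq_zero.mpr hcd
        rw [List.count_cons_self, ← hsplit, List.count_append, h1, h2]
      have hcountd : ∀ x ∈ d, (c :: rest).count x = d.count x := by
        intro x hx
        have hxc : x ≠ c := fun hh => hcd (hh ▸ hx)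
        have hxt : t.count x = 0 := List.count_eq_zero.mpr (fun hmem => hxc (htc x hmem))
        rw [← hsplit]
        simp [List.count_append, hxt, Ne.symm hxc]
      -- the run check plus recursion mirrors the existential over the whole list
      have hiff : (∃ x ∈ c :: rest, 2 * (c :: rest).count x = n)
          ↔ (2 * (t.length + 1) = n ∨ ∃ x ∈ d, 2 * d.count x = n) := by
        constructor
        · rintro ⟨x, hx, hcnt⟩
          rcases List.mem_cons.mp hx with rfl | hx'
          · left; rw [hcountc] at hcnt; exact hcnt
          · rcases (by rw [← hsplit] at hx'; exact List.mem_append.mp hx') with hxt | hxd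
            · left; rw [htc x hxt, hcountc] at hcnt; exact hcnt
            · right; exact ⟨x, hxd, by rw [← hcountd x hxd]; exact hcnt⟩
        · rintro (hl | ⟨x, hx, hcnt⟩)
          · exact ⟨c, List.mem_cons_self, by rw [hcountc]; exact hl⟩
          · exact ⟨x, List.mem_cons_of_mem c (hsplit ▸ List.mem_append_right t hx),
              by rw [hcountd x hx]; exact hcnt⟩
      rw [runScan]
      by_cases hrun : 2 * (t.length + 1) = n
      · rw [if_pos (by rw [← ht]; exact hrun), if_pos (hiff.mpr (Or.inl hrun))]
      · rw [if_neg (by rw [← ht]; exact hrun)]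
        have hdlen : d.length ≤ f := by
          have h1 : d.length ≤ rest.length := List.length_dropWhile_le _ _
          have h2 : rest.length + 1 ≤ f + 1 := by simpa using hf
          omega
        rw [← hd, ih d hdlen hdp]
        by_cases hex : ∃ x ∈ d, 2 * d.count x = n
        · rw [if_pos hex, if_pos (hiff.mpr (Or.inr hex))]
        · rw [if_neg hex, if_neg (fun hh => by
            rcases hiff.mp hh with h1 | h2
            · exact hrun h1
            · exact hex h2)]

-- ===== VERDICT (by name: the statement is the Claim_ definition above) =====
theorem can_open_file_spec : Claim_equal_can_open_file := by
  intro p _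
  show can_open_file p = can_open_file_alt p
  rw [A_eq]
  unfold can_open_file_alt
  have hperm := PySem.List.sorted_perm p.toList (fun c => c) false
  have hpair : (PySem.List.sorted p.toList (fun c => c) false).Pairwise (· ≤ ·) := by
    simpa using PySem.List.sorted_pairwise p.toList (fun c => c)
  rw [runScan_eq (PySem.List.sorted p.toList (fun c => c) false).length _ _ le_rfl hpair]
  simp only [hperm.mem_iff, fun a => hperm.count_eq a]
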